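-- pv_equiv track=rewrite | github.com/XOM91K/EGE | Igor_2025/14/18.py | v_11
-- ===== SOURCE A (Python) =====
-- def v_11(n):
--     res = ''
--     while n >0:
--         i = n % 11
--         if i == 10:
--             res += 'A'
--         else:
--             res += str(i)
--         n = n//11
--     return res[::-1]
-- ===== SOURCE B (Python) =====
-- def v_11(n):
--     if n <= 0:
--         return ''
--     d = n % 11
--     return v_11(n // 11) + ('A' if d == 10 else str(d))
-- ===== Notes on version B (the rewrite author's own statement) =====
-- stated objective: simpler
-- what changed: Replaces the accumulate-LSB-first-then-reverse while loop by direct recursion that emits digits MSB-first, so no accumulator string and no final reversal are needed.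
import Mathlib
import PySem

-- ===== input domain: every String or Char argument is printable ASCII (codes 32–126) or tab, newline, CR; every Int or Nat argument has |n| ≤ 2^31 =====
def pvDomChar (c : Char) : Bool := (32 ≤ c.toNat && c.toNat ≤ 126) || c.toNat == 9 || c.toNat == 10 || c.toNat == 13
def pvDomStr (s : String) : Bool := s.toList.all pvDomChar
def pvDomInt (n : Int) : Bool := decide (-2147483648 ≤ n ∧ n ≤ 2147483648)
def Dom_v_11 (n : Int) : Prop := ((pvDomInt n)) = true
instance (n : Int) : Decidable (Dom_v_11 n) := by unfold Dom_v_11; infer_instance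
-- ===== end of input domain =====

-- B replaces A's accumulate-LSB-first-then-reverse loop by direct MSB-first recursion (objective: simpler).

-- ===== PORT A =====
def v11Digit (i : Int) : String := if i == 10 then "A" else PySem.Int.toStr i

def v11Loop (n : Int) (res : String) : String :=
  if h : n > 0 then
    v11Loop (PySem.Int.floordiv n 11) (res ++ v11Digit (PySem.Int.mod n 11))
  else res
termination_by n.toNat
decreasing_by
  rw [PySem.Int.floordiv_eq_ediv_of_pos (by norm_num : (0:Int) < 11)]
  omega

def v_11 (n : Int) : String :=
  (PySem.Str.slice? (v11Loop n "") none none (-1)).getD ""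

-- ===== PORT B =====
def v_11_alt (n : Int) : String :=
  if h : n ≤ 0 then ""
  else
    v_11_alt (PySem.Int.floordiv n 11) ++
      (if PySem.Int.mod n 11 == 10 then "A" else PySem.Int.toStr (PySem.Int.mod n 11))
termination_by n.toNat
decreasing_by
  rw [PySem.Int.floordiv_eq_ediv_of_pos (by norm_num : (0:Int) < 11)]
  omega

-- ===== PRECONDITION & SPEC =====
def Spec_v_11 (n : Int) (out : String) : Prop := out = v_11_alt n
instance (n : Int) (out : String) : Decidable (Spec_v_11 n out) := by unfold Spec_v_11; infer_instance

-- ===== CLAIM (what is proved, stated in full; the proofs are below) =====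
def Claim_equal_v_11 : Prop := ∀ (n : Int), Dom_v_11 n → Spec_v_11 n (v_11 n)

-- ===== LEMMAS AND PROOFS =====

-- a base-11 digit renders as a single character, hence reversing it is the identity
theorem v11Digit_rev (i : Int) (h0 : 0 ≤ i) (h1 : i < 11) :
    (v11Digit i).toList.reverse = (v11Digit i).toList := by
  interval_cases i <;> decide

-- loop invariant: A's loop appends the reverse of B's string to the accumulator
theorem v11Loop_eq (n : Int) (res : String) :
    (v11Loop n res).toList = res.toList ++ (v_11_alt n).toList.reverse := by
  induction n, res using v11Loop.induct with
  | case1 n res h ih =>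
    rw [v11Loop, dif_pos h, ih]
    conv_rhs => rw [v_11_alt, dif_neg (show ¬ n ≤ 0 by omega)]
    have h11 : (0:Int) < 11 := by norm_num
    have hm0 : 0 ≤ PySem.Int.mod n 11 := by
      rw [PySem.Int.mod_eq_emod_of_pos h11]; exact Int.emod_nonneg n (by norm_num)
    have hm1 : PySem.Int.mod n 11 < 11 := by
      rw [PySem.Int.mod_eq_emod_of_pos h11]; exact Int.emod_lt_of_pos n h11
    have hd : (if PySem.Int.mod n 11 == 10 then "A" else PySem.Int.toStr (PySem.Int.mod n 11))
        = v11Digit (PySem.Int.mod n 11) := rfl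
    rw [hd]
    rw [PySem.Int.mod_eq_emod_of_pos h11] at hm0 hm1
    simp [List.reverse_append]
    exact (v11Digit_rev _ hm0 hm1).symm
  | case2 n res h =>
    rw [v11Loop, dif_neg h, v_11_alt, dif_pos (show n ≤ 0 by omega)]
    simp

-- ===== VERDICT (by name: the statement is the Claim_ definition above) =====
theorem v_11_spec : Claim_equal_v_11 := by
  intro n _
  show v_11 n = v_11_alt n
  unfold v_11
  rw [PySem.Str.slice?_none_none_neg_one]
  simp [Option.getD, v11Loop_eq n ""]
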